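-- pv_equiv track=rewrite | github.com/lab7arriam/Cry_phylogeny | scripts/parse_tree.py | prepare_tree
-- ===== SOURCE A (Python) =====
-- def remove_last(stack):
--     return(stack[0:len(stack)-1])
--
-- def get_last(stack):
--     return(stack[len(stack)-1])
--
-- def prepare_tree(tree_str,close_node_dict):
--     replaced_tree=str()
--     replaced_tree=tree_str
--     ind_stack=list()
--     pairs=list()
--     for i in range(len(tree_str)):
--         if tree_str[i]=='(':
--             ind_stack.append(i)
--         if tree_str[i]==')':
--             pairs.append([get_last(ind_stack),i])
--             ind_stack=remove_last(ind_stack)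
--     pair_lens=sorted(list(set(sorted([int(pair[1])-int(pair[0]) for pair in pairs]))))
--     i=len(close_node_dict)+1
--     for leng in pair_lens:
--         name_set=set()
--         for pair in pairs:
--             if int(pair[1])-int(pair[0]) == leng:
--                 if tree_str[int(pair[0]):int(pair[1])+1].count('(')==1:
--                     if tree_str[int(pair[0]):int(pair[1])+1].replace(')','').replace('(','') not in name_set:
--                         close_node_dict[i].append(tree_str[int(pair[0]):int(pair[1])+1].replace(')','').replace('(',''))
--                         replaced_tree=replaced_tree.replace(tree_str[int(pair[0]):int(pair[1])+1],str(i))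
--                         i+=1
--                     name_set.add(tree_str[int(pair[0]):int(pair[1])+1].replace(')','').replace('(',''))
--     return(replaced_tree)
-- ===== SOURCE B (Python) =====
-- def prepare_tree(tree_str, close_node_dict):
--     # One pass with a pop-based stack collects only the innermost groups
--     # (a pair is innermost exactly when the previous paren seen was its '(');
--     # then a single stable sort by length replaces A's per-length rescans.
--     groups = []  # (length, substring) in closing-position order
--     stack = []
--     prev_open = False
--     for pos, ch in enumerate(tree_str):
--         if ch == '(':
--             stack.append(pos)
--             prev_open = True
--         elif ch == ')':
--             start = stack.pop()
--             if prev_open: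
--                 groups.append((pos - start, tree_str[start:pos + 1]))
--             prev_open = False
--     groups.sort(key=lambda g: g[0])  # stable: ties keep closing order
--     out = tree_str
--     seen = set()
--     label = len(close_node_dict) + 1
--     for _, sub in groups:
--         name = sub[1:-1]
--         if name not in seen:
--             seen.add(name)
--             close_node_dict[label].append(name)
--             out = out.replace(sub, str(label))
--             label += 1
--     return out
-- ===== Notes on version B (the rewrite author's own statement) =====
-- stated objective: alternative
-- what changed: A matches all parentheses, then for every distinct pair-length rescans the whole pair list, re-slicing and re-counting each pair; B collects only the innermost groups in one pop-based scan (a pair is innermost iff the previous paren seen was its '('), sorts them once stably by length and does a single replacement pass with one global seen-set.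
import Mathlib
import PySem

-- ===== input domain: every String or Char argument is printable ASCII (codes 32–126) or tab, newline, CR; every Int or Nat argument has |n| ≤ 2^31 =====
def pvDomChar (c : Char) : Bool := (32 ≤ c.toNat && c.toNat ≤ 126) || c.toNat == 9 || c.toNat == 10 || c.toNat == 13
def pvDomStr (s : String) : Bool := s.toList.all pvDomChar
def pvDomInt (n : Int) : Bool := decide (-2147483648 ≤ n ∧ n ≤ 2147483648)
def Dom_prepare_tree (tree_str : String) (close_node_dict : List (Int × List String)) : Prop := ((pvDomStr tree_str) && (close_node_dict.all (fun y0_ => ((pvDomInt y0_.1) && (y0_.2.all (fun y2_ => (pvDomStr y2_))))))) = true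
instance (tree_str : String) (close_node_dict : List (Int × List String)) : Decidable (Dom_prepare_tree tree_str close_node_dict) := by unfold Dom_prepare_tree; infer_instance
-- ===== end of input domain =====

-- B replaces A's three-level rescan (all lengths × all pairs × slicing/counting per pair) by a single
-- pop-based scan that keeps only innermost groups, one stable sort by length, and one replacement pass;
-- equivalence is about the RETURN value (both Pythons also append the same names to close_node_dict).

-- ===== PORT A =====
-- helper remove_last(stack) = stack[0:len(stack)-1]
def pv_remove_last (stack : List Int) : List Int :=
  PySem.List.slice stack (some 0) (some (PySem.List.len stack - 1))

-- helper get_last(stack) = stack[len(stack)-1]  (none = IndexError)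
def pv_get_last (stack : List Int) : Option Int :=
  PySem.List.pyGet? stack (PySem.List.len stack - 1)

-- body of A's first loop (over i in range(len(tree_str))); none = IndexError propagated
def pvA_scanStep (cs : List Char) (st : Option (List Int × List (Int × Int))) (i : Int) :
    Option (List Int × List (Int × Int)) :=
  match st with
  | none => none
  | some (stack, pairs) =>
    let c := PySem.List.pyGetD cs i ' '
    let stack := if c = '(' then stack ++ [i] else stack
    if c = ')' then
      match pv_get_last stack with
      | none => none
      | some a => some (pv_remove_last stack, pairs ++ [(a, i)])
    else some (stack, pairs)

-- A's innermost-if body: the pair passed both the length test and the count('(')==1 test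
def pvA_hit (cs : List Char) (p : Int × Int)
    (st : Option (List Char × PySem.Dict Int (List String) × Int × PySem.Set (List Char))) :
    Option (List Char × PySem.Dict Int (List String) × Int × PySem.Set (List Char)) :=
  match st with
  | none => none
  | some (r, d, i, ns) =>
    let sub := PySem.Chars.slice cs (some p.1) (some (p.2 + 1))
    let name := PySem.Chars.replace (PySem.Chars.replace sub [')'] []) ['('] []
    if PySem.Set.contains ns name then some (r, d, i, PySem.Set.add ns name)
    else
      match d.get? i with
      | none => none   -- KeyError
      | some lst =>
        some (PySem.Chars.replace r sub (PySem.Int.toChars i),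
              d.insert i (lst ++ [String.ofList name]), i + 1, PySem.Set.add ns name)

def prepare_tree (tree_str : String) (close_node_dict : List (Int × List String)) : String :=
  let cs := tree_str.toList
  match (PySem.List.pyRange 0 (PySem.Str.len tree_str)).foldl (pvA_scanStep cs) (some ([], [])) with
  | none => ""   -- IndexError (unmatched ')'); outside Pre_
  | some (_, pairs) =>
    let pair_lens := PySem.List.sorted
      (PySem.Set.ofList (PySem.List.sorted (pairs.map (fun p => p.2 - p.1)) (fun x => x)))
      (fun x => x)
    let d := PySem.Dict.ofList close_node_dict
    let res := pair_lens.foldl (fun st leng =>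
        match (pairs.foldl (fun st2 p =>
            if p.2 - p.1 == leng then
              (if PySem.Chars.count (PySem.Chars.slice cs (some p.1) (some (p.2 + 1))) ['('] == 1 then
                 pvA_hit cs p st2
               else st2)
            else st2)
          (match st with
           | none => none
           | some (r, d, i) => some (r, d, i, PySem.Set.empty))) with
        | none => none
        | some (r, d, i, _) => some (r, d, i))
      (some (cs, d, (close_node_dict.length : Int) + 1))
    match res with
    | none => ""   -- KeyError; outside Pre_
    | some (r, _, _) => String.ofList r

-- ===== PORT B =====
-- body of B's scan (over enumerate(tree_str)); none = IndexError from stack.pop()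
def pvB_scanStep (cs : List Char)
    (st : Option (List (Int × List Char) × List Int × Bool)) (pc : Int × Char) :
    Option (List (Int × List Char) × List Int × Bool) :=
  match st with
  | none => none
  | some (groups, stack, prevOpen) =>
    if pc.2 = '(' then some (groups, stack ++ [pc.1], true)
    else if pc.2 = ')' then
      match PySem.List.pop? stack with
      | none => none
      | some (start, stack') =>
        some ((if prevOpen then
                 groups ++ [(pc.1 - start, PySem.Chars.slice cs (some start) (some (pc.1 + 1)))]
               else groups), stack', false)
    else some (groups, stack, prevOpen)

-- body of B's replacement loop over the sorted groups
def pvB_repStep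
    (st : Option (List Char × PySem.Dict Int (List String) × Int × PySem.Set (List Char)))
    (g : Int × List Char) :
    Option (List Char × PySem.Dict Int (List String) × Int × PySem.Set (List Char)) :=
  match st with
  | none => none
  | some (out, d, label, seen) =>
    let name := PySem.Chars.slice g.2 (some 1) (some (-1))
    if PySem.Set.contains seen name then some (out, d, label, seen)
    else
      match d.get? label with
      | none => none   -- KeyError
      | some lst =>
        some (PySem.Chars.replace out g.2 (PySem.Int.toChars label),
              d.insert label (lst ++ [String.ofList name]), label + 1, PySem.Set.add seen name)

def prepare_tree_alt (tree_str : String) (close_node_dict : List (Int × List String)) : String :=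
  let cs := tree_str.toList
  match (PySem.List.enumerate cs).foldl (pvB_scanStep cs) (some ([], [], false)) with
  | none => ""   -- IndexError; outside Pre_
  | some (groups, _, _) =>
    let gs := PySem.List.sorted groups (fun g => g.1)
    let d := PySem.Dict.ofList close_node_dict
    match gs.foldl pvB_repStep (some (cs, d, (close_node_dict.length : Int) + 1, PySem.Set.empty)) with
    | none => ""   -- KeyError; outside Pre_
    | some (out, _, _, _) => String.ofList out

-- ===== PRECONDITION & SPEC =====
-- balance scan: false exactly when some ')' has no matching '(' (A's IndexError)
def pvBalancedB : List Char → Int → Bool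
  | [], _ => true
  | c :: r, bal =>
    if c = '(' then pvBalancedB r (bal + 1)
    else if c = ')' then (decide (0 < bal) && pvBalancedB r (bal - 1))
    else pvBalancedB r bal

-- names of the innermost groups '(X)' (X paren-free), in order of their closing parenthesis
def pvInnerNames : List Char → Option (List Char) → List (List Char)
  | [], _ => []
  | c :: r, buf =>
    if c = '(' then pvInnerNames r (some [])
    else if c = ')' then
      match buf with
      | some b => b :: pvInnerNames r none
      | none => pvInnerNames r none
    else pvInnerNames r (buf.map (· ++ [c]))

-- Pre_ excludes exactly the inputs where A raises: an unmatched ')' (IndexError), or a missing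
-- consecutive key len(dict)+1, …, len(dict)+N (KeyError), N = number of distinct innermost names.
def Pre_prepare_tree (tree_str : String) (close_node_dict : List (Int × List String)) : Prop :=
  pvBalancedB tree_str.toList 0 = true ∧
  ∀ j < (PySem.Set.ofList (pvInnerNames tree_str.toList none)).length,
    ((close_node_dict.length : Int) + 1 + (j : Int)) ∈ close_node_dict.map Prod.fst

instance (tree_str : String) (close_node_dict : List (Int × List String)) : Decidable (Pre_prepare_tree tree_str close_node_dict) := by unfold Pre_prepare_tree; infer_instance

def pvWitness_prepare_tree : String × (List (Int × List String)) := ("((a,b),c)", [(2, []), (3, [])])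

def Spec_prepare_tree (tree_str : String) (close_node_dict : List (Int × List String)) (out : String) : Prop := out = prepare_tree_alt tree_str close_node_dict
instance (tree_str : String) (close_node_dict : List (Int × List String)) (out : String) : Decidable (Spec_prepare_tree tree_str close_node_dict out) := by unfold Spec_prepare_tree; infer_instance

-- ===== CLAIM (what is proved, stated in full; the proofs are below) =====
def Claim_equal_prepare_tree : Prop := ∀ (tree_str : String) (close_node_dict : List (Int × List String)), Dom_prepare_tree tree_str close_node_dict → Pre_prepare_tree tree_str close_node_dict → Spec_prepare_tree tree_str close_node_dict (prepare_tree tree_str close_node_dict)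

-- ===== LEMMAS AND PROOFS =====

-- the substring tree_str[p0:p1+1] of a pair, A's innermost test, and the group B builds from a pair
def pvSub (cs : List Char) (p : Int × Int) : List Char :=
  PySem.Chars.slice cs (some p.1) (some (p.2 + 1))

def pvInnerTest (cs : List Char) (p : Int × Int) : Bool :=
  PySem.Chars.count (pvSub cs p) ['('] == 1

def pvToGroup (cs : List Char) (p : Int × Int) : Int × List Char :=
  (p.2 - p.1, pvSub cs p)

theorem get_last_eq (stack : List Int) : pv_get_last stack = stack.getLast? := by
  unfold pv_get_last
  cases stack with
  | nil => rfl
  | cons x t =>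
    have h1 : (0:Int) ≤ ((x :: t).length:Int) - 1 := by simp
    have h2 : ((x :: t).length:Int) - 1 < ((x :: t).length:Int) := by omega
    simp only [PySem.List.pyGet?, PySem.List.pyIdx?, PySem.List.len, if_pos h1, if_pos h2]
    have h3 : (((x :: t).length:Int) - 1).toNat = (x :: t).length - 1 := by omega
    rw [h3]
    simp [List.getLast?_eq_getElem?]

-- shape of an innermost group: '(' X ')' with X paren-free, group length = |X| + 1
def pvGood (g : Int × List Char) : Prop :=
  ∃ mid : List Char, g.2 = '(' :: (mid ++ [')']) ∧
    (∀ c ∈ mid, c ≠ '(' ∧ c ≠ ')') ∧ g.1 = (mid.length : Int) + 1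

-- no parenthesis at positions j with l ≤ j < r
def pvNoParen (cs : List Char) (l r : Nat) : Prop :=
  ∀ j : Nat, l ≤ j → j < r → cs.getD j ' ' ≠ '(' ∧ cs.getD j ' ' ≠ ')'

-- invariant of the two scans after processing the first k characters
def pvScanInv (cs : List Char) (k : Nat) (stack : List Int) (pairs : List (Int × Int))
    (groups : List (Int × List Char)) (prev : Bool) : Prop :=
  (∀ a ∈ stack, ∃ na : Nat, a = (na : Int) ∧ na < k ∧ cs.getD na ' ' = '(') ∧
  stack.Pairwise (· < ·) ∧
  (prev = true → ∃ na : Nat, stack.getLast? = some (na : Int) ∧ pvNoParen cs (na + 1) k) ∧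
  (prev = false → ∀ na : Nat, stack.getLast? = some (na : Int) →
      ∃ j : Nat, na < j ∧ j < k ∧ cs.getD j ' ' = '(') ∧
  groups = (pairs.filter (pvInnerTest cs)).map (pvToGroup cs) ∧
  (∀ g ∈ groups, pvGood g)

-- relation between the two scans' results
def pvScanRel (cs : List Char) (oa : Option (List Int × List (Int × Int)))
    (ob : Option (List (Int × List Char) × List Int × Bool)) : Prop :=
  (oa = none ∧ ob = none) ∨
  ∃ stack pairs groups prev, oa = some (stack, pairs) ∧ ob = some (groups, stack, prev) ∧
    groups = (pairs.filter (pvInnerTest cs)).map (pvToGroup cs) ∧ (∀ g ∈ groups, pvGood g)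

theorem remove_last_eq (stack : List Int) : pv_remove_last stack = stack.dropLast := by
  unfold pv_remove_last
  cases stack with
  | nil => rfl
  | cons x t =>
    have h1 : ¬ ((x :: t).length : Int) - 1 < 0 := by simp
    simp only [PySem.List.slice, PySem.List.clampIdx, PySem.List.len, if_neg h1]
    have h2 : (((x :: t).length : Int) - 1).toNat = (x :: t).length - 1 := by omega
    simp [List.dropLast_eq_take]

theorem pop_neg_one_eq (t : List Int) :
    PySem.List.pop? t = (t.getLast?).map (fun v => (v, t.dropLast)) := by
  cases t with
  | nil => rfl
  | cons x s =>
    simp only [PySem.List.pop?, PySem.List.pyIdx?]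
    have h1 : ¬ (0:Int) ≤ -1 := by omega
    have h2 : -((x :: s).length:Int) ≤ -1 := by simp
    rw [if_neg h1, if_pos h2]
    simp [List.getLast?_eq_getElem?, List.dropLast_eq_eraseIdx]

theorem count_go_singleton (ch : Char) :
    ∀ (fuel : Nat) (l : List Char) (acc : Nat), l.length ≤ fuel →
      PySem.Chars.count.go [ch] fuel l acc = acc + l.count ch := by
  intro fuel
  induction fuel with
  | zero => intro l acc h; cases l <;> simp [PySem.Chars.count.go] at *
  | succ n ih =>
    intro l acc h
    cases l with
    | nil => simp [PySem.Chars.count.go]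
    | cons c t =>
      simp only [PySem.Chars.count.go]
      by_cases hc : c = ch
      · have hp : [ch].isPrefixOf (c :: t) = true := by simp [hc, List.isPrefixOf]
        rw [if_pos hp]
        simp only [List.length_cons] at h
        rw [show ([ch].length) = 1 from rfl]
        simp only [List.drop_one, List.tail_cons]
        rw [ih t (acc+1) (by omega)]
        simp [hc]
        omega
      · have hp : [ch].isPrefixOf (c :: t) = false := by
          simp [List.isPrefixOf]; exact fun h => absurd h.symm hc
        rw [if_neg (by simp [hp])]
        simp only [List.length_cons] at h
        rw [ih t acc (by omega)]
        simp [hc]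

theorem count_singleton (l : List Char) (ch : Char) :
    PySem.Chars.count l [ch] = l.count ch := by
  simp [PySem.Chars.count, count_go_singleton ch l.length l 0 le_rfl]

theorem replace_go_del_singleton (ch : Char) :
    ∀ (fuel : Nat) (l acc : List Char), l.length ≤ fuel →
      PySem.Chars.replace.go [ch] [] fuel l acc = acc.reverse ++ l.filter (fun x => x ≠ ch) := by
  intro fuel
  induction fuel with
  | zero => intro l acc h; cases l <;> simp [PySem.Chars.replace.go] at *
  | succ n ih =>
    intro l acc h
    cases l with
    | nil => simp [PySem.Chars.replace.go]
    | cons c t =>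
      simp only [PySem.Chars.replace.go]
      by_cases hc : c = ch
      · have hp : [ch].isPrefixOf (c :: t) = true := by simp [hc, List.isPrefixOf]
        rw [if_pos hp]
        simp only [List.length_cons] at h
        rw [show ([ch].length) = 1 from rfl]
        simp only [List.drop_one, List.tail_cons, List.reverse_nil, List.nil_append]
        rw [ih t acc (by omega)]
        simp [hc]
      · have hp : [ch].isPrefixOf (c :: t) = false := by
          simp [List.isPrefixOf]; exact fun h => absurd h.symm hc
        rw [if_neg (by simp [hp])]
        simp only [List.length_cons] at h
        rw [ih t (c :: acc) (by omega)]
        simp [hc]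

theorem replace_del_singleton (l : List Char) (ch : Char) :
    PySem.Chars.replace l [ch] [] = l.filter (fun x => x ≠ ch) := by
  simp [PySem.Chars.replace, replace_go_del_singleton ch l.length l [] le_rfl]

-- the A scan step and B scan step keep `none`
theorem foldA_none (cs : List Char) (l : List Int) :
    l.foldl (pvA_scanStep cs) none = none := by
  induction l with
  | nil => rfl
  | cons x t ih => simpa [pvA_scanStep] using ih

theorem foldB_none (cs : List Char) (l : List (Int × Char)) :
    l.foldl (pvB_scanStep cs) none = none := by
  induction l with
  | nil => rfl
  | cons x t ih => simpa [pvB_scanStep] using ih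

-- decomposition of the slice tree_str[na:k+1] of a matched pair
theorem sub_decomp (cs : List Char) (na k : Nat) (hak : na < k) (hk : k < cs.length) :
    pvSub cs ((na : Int), (k : Int)) =
      cs.getD na ' ' :: (((cs.drop (na+1)).take (k - 1 - na)) ++ [cs.getD k ' ']) := by
  unfold pvSub
  rw [PySem.Chars.slice_eq_listSlice]
  have h1 : ((k : Int) + 1) = ((k + 1 : Nat) : Int) := by push_cast; ring
  rw [h1, PySem.List.slice_natCast]
  have hd : cs.drop na = cs.getD na ' ' :: cs.drop (na+1) := by
    rw [List.getD_eq_getElem?_getD, List.getElem?_eq_getElem (by omega)]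
    rw [List.drop_eq_getElem_cons (by omega : na < cs.length)]
    rfl
  rw [hd]
  have h2 : k + 1 - na = (k - na - 1) + 1 + 1 := by omega
  rw [h2, List.take_succ_cons]
  congr 1
  have h3 : (cs.drop (na+1)).take (k - na - 1 + 1) =
      (cs.drop (na+1)).take (k - na - 1) ++ [(cs.drop (na+1)).getD (k - na - 1) ' '] := by
    rw [List.take_add_one]
    congr 1
    rw [List.getD_eq_getElem?_getD, List.getElem?_eq_getElem (by simp; omega)]
    simp
  rw [h3]
  have h4 : k - 1 - na = k - na - 1 := by omega
  rw [h4]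
  congr 2
  rw [List.getD_eq_getElem?_getD, List.getD_eq_getElem?_getD, List.getElem?_drop]
  congr 2
  omega

theorem mem_mid (cs : List Char) (na k : Nat) (x : Char)
    (hx : x ∈ (cs.drop (na+1)).take (k - 1 - na)) :
    ∃ j : Nat, na < j ∧ j < k ∧ cs.getD j ' ' = x := by
  rw [List.mem_iff_getElem] at hx
  obtain ⟨m, hm, hval⟩ := hx
  simp [List.getElem_take, List.getElem_drop] at hval hm
  refine ⟨na + 1 + m, by omega, by omega, ?_⟩
  rw [List.getD_eq_getElem?_getD, List.getElem?_eq_getElem (by omega)]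
  simpa using hval

theorem mid_mem (cs : List Char) (na k j : Nat) (hj1 : na < j) (hj2 : j < k) (hk : k ≤ cs.length) :
    cs.getD j ' ' ∈ (cs.drop (na+1)).take (k - 1 - na) := by
  rw [List.mem_iff_getElem]
  refine ⟨j - na - 1, by simp; omega, ?_⟩
  rw [List.getElem_take, List.getElem_drop,
      List.getD_eq_getElem?_getD, List.getElem?_eq_getElem (by omega)]
  congr 1
  omega

-- ===== the scan equivalence =====
theorem scan_loop (cs : List Char) :
    ∀ (rest : List Char) (k : Nat), cs.drop k = rest →
    ∀ stack pairs groups prev, pvScanInv cs k stack pairs groups prev →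
    pvScanRel cs
      ((PySem.List.pyRange (k : Int) (cs.length : Int)).foldl (pvA_scanStep cs) (some (stack, pairs)))
      ((PySem.List.enumerate rest (k : Int)).foldl (pvB_scanStep cs) (some (groups, stack, prev))) := by
  intro rest
  induction rest with
  | nil =>
    intro k hdrop stack pairs groups prev hinv
    have hk : cs.length ≤ k := by
      by_contra hlt
      rw [List.drop_eq_nil_iff] at hdrop
      omega
    have hrange : PySem.List.pyRange (k : Int) (cs.length : Int) = [] := by
      have : ¬ ((k : Int) < (cs.length : Int)) := by exact_mod_cast not_lt.mpr hk
      simp [PySem.List.pyRange, this]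
    rw [hrange]
    obtain ⟨_, _, _, _, hgr, hgood⟩ := hinv
    exact Or.inr ⟨stack, pairs, groups, prev, rfl, rfl, hgr, hgood⟩
  | cons c rest' ih =>
    intro k hdrop stack pairs groups prev hinv
    obtain ⟨h1, h2, h3, h4, hgr, hgood⟩ := hinv
    have hk : k < cs.length := by
      by_contra hge
      rw [not_lt] at hge
      rw [List.drop_eq_nil_iff.mpr (by omega)] at hdrop
      exact absurd hdrop (by simp)
    have hck : cs.getD k ' ' = c := by
      have h0 : cs[k]? = some c := by
        rw [show k = k + 0 from rfl, ← List.getElem?_drop, hdrop]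
        rfl
      simp [List.getD_eq_getElem?_getD, h0]
    have hdrop' : cs.drop (k + 1) = rest' := by
      have : cs.drop (k+1) = (cs.drop k).tail := by
        rw [List.tail_drop]
      rw [this, hdrop]
      rfl
    have hcast : ((k : Int) + 1) = ((k + 1 : Nat) : Int) := by push_cast; ring
    rw [PySem.List.pyRange_one_cons (by exact_mod_cast hk), PySem.List.enumerate_cons]
    simp only [List.foldl_cons]
    have hAstep : pvA_scanStep cs (some (stack, pairs)) (k : Int) =
        (if c = '(' then some (stack ++ [(k : Int)], pairs)
         else if c = ')' then
           (match stack.getLast? with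
            | none => none
            | some a => some (stack.dropLast, pairs ++ [(a, (k : Int))]))
         else some (stack, pairs)) := by
      simp only [pvA_scanStep, PySem.List.pyGetD_natCast, hck]
      by_cases hc1 : c = '('
      · simp [hc1]
      · by_cases hc2 : c = ')'
        · simp only [hc2, if_neg (by simp : ¬ (')' = '('))]
          simp only [get_last_eq, remove_last_eq]
        · simp [hc1, hc2]
    have hBstep : pvB_scanStep cs (some (groups, stack, prev)) ((k : Int), c) =
        (if c = '(' then some (groups, stack ++ [(k : Int)], true)
         else if c = ')' then
           (match stack.getLast? with
            | none => none
            | some a =>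
              some ((if prev then
                       groups ++ [((k : Int) - a, PySem.Chars.slice cs (some a) (some ((k : Int) + 1)))]
                     else groups), stack.dropLast, false))
         else some (groups, stack, prev)) := by
      simp only [pvB_scanStep, pop_neg_one_eq]
      by_cases hc1 : c = '('
      · simp [hc1]
      · by_cases hc2 : c = ')'
        · cases stack.getLast? <;> simp [hc2]
        · simp [hc1, hc2]
    rw [hAstep, hBstep]
    by_cases hc1 : c = '('
    · rw [if_pos hc1, if_pos hc1, hcast]
      apply ih (k+1) hdrop'
      refine ⟨?_, ?_, ?_, ?_, hgr, hgood⟩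
      · intro a ha
        rcases List.mem_append.mp ha with ha | ha
        · obtain ⟨na, rfl, hna, hpa⟩ := h1 a ha
          exact ⟨na, rfl, by omega, hpa⟩
        · simp at ha
          subst ha
          exact ⟨k, rfl, by omega, by rw [hck, hc1]⟩
      · rw [List.pairwise_append]
        refine ⟨h2, by simp, ?_⟩
        intro x hx y hy
        simp at hy
        subst hy
        obtain ⟨na, rfl, hna, _⟩ := h1 x hx
        exact_mod_cast hna
      · intro _
        refine ⟨k, List.getLast?_concat, ?_⟩
        intro j hj1 hj2
        exact absurd (hj1.trans_lt hj2) (lt_irrefl _)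
      · intro hfalse
        exact absurd hfalse (by simp)
    · by_cases hc2 : c = ')'
      · rw [if_neg hc1, if_pos hc2, if_neg hc1, if_pos hc2]
        cases hlast : stack.getLast? with
        | none =>
          simp only
          rw [foldA_none, foldB_none]
          exact Or.inl ⟨rfl, rfl⟩
        | some a =>
          have hamem : a ∈ stack := List.mem_of_getLast? hlast
          obtain ⟨na, rfl, hnak, hpa⟩ := h1 a hamem
          -- innermost test on the new pair equals prev
          have hmidlen : ((cs.drop (na+1)).take (k - 1 - na)).length = k - 1 - na := by
            rw [List.length_take, List.length_drop]
            omega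
          have hsub : pvSub cs ((na : Int), (k : Int)) =
              '(' :: (((cs.drop (na+1)).take (k - 1 - na)) ++ [')']) := by
            rw [sub_decomp cs na k hnak hk, hpa, hck, hc2]
          have htest : pvInnerTest cs ((na : Int), (k : Int)) = prev := by
            unfold pvInnerTest
            rw [show (pvSub cs ((na:Int),(k:Int))) = pvSub cs ((na:Int),(k:Int)) from rfl]
            rw [count_singleton, hsub]
            cases prev with
            | true =>
              obtain ⟨nb, hlast', hnp⟩ := h3 rfl
              rw [hlast] at hlast'
              have hba : na = nb := by
                have h5 := Option.some.inj hlast'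
                exact_mod_cast h5
              subst hba
              have hcnt : ((cs.drop (na+1)).take (k - 1 - na)).count '(' = 0 := by
                rw [List.count_eq_zero]
                intro hmem
                obtain ⟨j, hj1, hj2, hj3⟩ := mem_mid cs na k '(' hmem
                exact (hnp j (by omega) hj2).1 hj3
              have hcc : ('(' :: (((cs.drop (na+1)).take (k - 1 - na)) ++ [')'])).count '(' =
                  ((cs.drop (na+1)).take (k - 1 - na)).count '(' + 1 := by simp
              rw [hcc, hcnt]
              rfl
            | false =>
              obtain ⟨j, hj1, hj2, hj3⟩ := h4 rfl na hlast
              have hmem : '(' ∈ (cs.drop (na+1)).take (k - 1 - na) := by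
                rw [← hj3]
                exact mid_mem cs na k j hj1 hj2 (by omega)
              have hcnt : 1 ≤ ((cs.drop (na+1)).take (k - 1 - na)).count '(' :=
                List.one_le_count_iff.mpr hmem
              have hcc : ('(' :: (((cs.drop (na+1)).take (k - 1 - na)) ++ [')'])).count '(' =
                  ((cs.drop (na+1)).take (k - 1 - na)).count '(' + 1 := by simp
              rw [hcc, beq_eq_false_iff_ne]
              omega
          simp only
          rw [hcast]
          -- the new group B may append, and its good shape
          set mid := (cs.drop (na+1)).take (k - 1 - na) with hmid
          have hgnew2 : PySem.List.slice cs (some (na : Int)) (some ((k : Int) + 1)) =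
              pvSub cs ((na : Int), (k : Int)) := by simp [pvSub]
          have hstackeq : ∃ l', stack = l' ++ [(na : Int)] := by
            rcases List.getLast?_eq_some_iff.mp hlast with ⟨l', hl'⟩
            exact ⟨l', hl'⟩
          obtain ⟨l', hl'⟩ := hstackeq
          have hdropLast : stack.dropLast = l' := by rw [hl', List.dropLast_concat]
          apply ih (k+1) hdrop'
          refine ⟨?_, ?_, ?_, ?_, ?_, ?_⟩
          · intro a ha
            have : a ∈ stack := (List.dropLast_sublist stack).subset ha
            obtain ⟨nb, rfl, hnb, hpb⟩ := h1 a this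
            exact ⟨nb, rfl, by omega, hpb⟩
          · exact h2.sublist (List.dropLast_sublist stack)
          · intro hfalse
            exact absurd hfalse (by simp)
          · intro _ na' hlast'
            have hmem' : (na' : Int) ∈ l' := by
              rw [← hdropLast]
              exact List.mem_of_getLast? hlast'
            have hlt : (na' : Int) < (na : Int) := by
              have hpw := h2
              rw [hl', List.pairwise_append] at hpw
              exact hpw.2.2 _ hmem' _ (by simp)
            exact ⟨na, by exact_mod_cast hlt, by omega, hpa⟩
          · rw [List.filter_append, List.map_append, ← hgr]
            cases prev with
            | true =>
              rw [if_pos rfl]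
              congr 1
              simp [htest, pvToGroup, pvSub]
            | false =>
              rw [if_neg (by simp)]
              simp only [List.filter_cons, htest, List.filter_nil]
              simp
          · cases prev with
            | false =>
              rw [if_neg (by simp)]
              exact hgood
            | true =>
              rw [if_pos rfl]
              intro g hgmem
              rcases List.mem_append.mp hgmem with hgm | hgm
              · exact hgood g hgm
              · simp at hgm
                subst hgm
                refine ⟨mid, ?_, ?_, ?_⟩
                · rw [hgnew2, hsub]
                · intro x hx
                  obtain ⟨j, hj1, hj2, hj3⟩ := mem_mid cs na k x hx
                  obtain ⟨nb, hlast', hnp⟩ := h3 rfl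
                  rw [hlast] at hlast'
                  have hba : na = nb := by
                    have h5 := Option.some.inj hlast'
                    exact_mod_cast h5
                  subst hba
                  have := hnp j (by omega) hj2
                  constructor
                  · intro heq; rw [hj3] at this; exact this.1 heq
                  · intro heq; rw [hj3] at this; exact this.2 heq
                · simp only
                  rw [hmidlen]
                  omega
      · rw [if_neg hc1, if_neg hc2, if_neg hc1, if_neg hc2, hcast]
        apply ih (k+1) hdrop'
        refine ⟨?_, h2, ?_, ?_, hgr, hgood⟩
        · intro a ha
          obtain ⟨na, rfl, hna, hpa⟩ := h1 a ha
          exact ⟨na, rfl, by omega, hpa⟩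
        · intro hp
          obtain ⟨nb, hlast', hnp⟩ := h3 hp
          refine ⟨nb, hlast', ?_⟩
          intro j hj1 hj2
          by_cases hjk : j = k
          · subst hjk
            rw [hck]
            exact ⟨hc1, hc2⟩
          · exact hnp j hj1 (by omega)
        · intro hp na hlast'
          obtain ⟨j, hj1, hj2, hj3⟩ := h4 hp na hlast'
          exact ⟨j, hj1, by omega, hj3⟩


-- ===== the replacement-phase equivalence =====

theorem slice_inner (x y : Char) (mid : List Char) :
    PySem.Chars.slice (x :: (mid ++ [y])) (some 1) (some (-1)) = mid := by
  rw [PySem.Chars.slice_eq_listSlice]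
  simp only [PySem.List.slice, PySem.List.clampIdx]
  norm_num
  rw [if_neg (by omega)]
  simp [List.take_left']

-- pointwise: on a good group, A's hit body is B's step body
theorem hit_eq_repStep (cs : List Char) (p : Int × Int) (hg : pvGood (pvToGroup cs p)) (st) :
    pvA_hit cs p st = pvB_repStep st (pvToGroup cs p) := by
  obtain ⟨mid, hsub, hfree, _⟩ := hg
  cases st with
  | none => rfl
  | some s =>
    obtain ⟨r, d, i, ns⟩ := s
    have hsub' : PySem.Chars.slice cs (some p.1) (some (p.2 + 1)) = '(' :: (mid ++ [')']) := hsub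
    have hnameA : PySem.Chars.replace
        (PySem.Chars.replace (PySem.Chars.slice cs (some p.1) (some (p.2 + 1))) [')'] []) ['('] [] = mid := by
      rw [hsub', replace_del_singleton, replace_del_singleton]
      simp [List.filter_append]
      exact fun a ha => ⟨(hfree a ha).1, (hfree a ha).2⟩
    have hnameB : PySem.Chars.slice (pvToGroup cs p).2 (some 1) (some (-1)) = mid := by
      rw [show (pvToGroup cs p).2 = PySem.Chars.slice cs (some p.1) (some (p.2 + 1)) from rfl,
          hsub']
      exact slice_inner '(' ')' mid
    simp only [pvA_hit, pvB_repStep, hnameA, hnameB]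
    have hg2 : (pvToGroup cs p).2 = PySem.Chars.slice cs (some p.1) (some (p.2 + 1)) := rfl
    rw [hg2]
    by_cases hc : mid ∈ ns
    · simp [hc, PySem.Set.add]
    · simp [hc, PySem.Set.add]

theorem insertBy_through_prefix {α : Type} (before : α → α → Bool) (x : α) (pre suf : List α)
    (h : ∀ b ∈ pre, before x b = false) :
    PySem.List.insertBy before x (pre ++ suf) = pre ++ PySem.List.insertBy before x suf := by
  induction pre with
  | nil => simp
  | cons y t ih =>
    have hy : before x y = false := h y (by simp)
    simp only [List.cons_append, PySem.List.insertBy, hy]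
    simp only [Bool.false_eq_true, if_false]
    rw [ih (fun b hb => h b (by simp [hb]))]

-- inserting into blocks grouped by strictly increasing keys appends to the key's block
theorem insertBy_flatMap {α : Type} (key : α → Int) (x : α) (L : List Int) (g : Int → List α)
    (hL : L.Pairwise (· < ·)) (hmem : key x ∈ L) (hblocks : ∀ k ∈ L, ∀ y ∈ g k, key y = k) :
    PySem.List.insertBy (fun a b => decide (key a < key b)) x (L.flatMap g) =
      L.flatMap (fun k => if k = key x then g k ++ [x] else g k) := by
  induction L with
  | nil => exact absurd hmem (by simp)
  | cons kk L' ih =>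
    have hkey_flat : ∀ y ∈ L'.flatMap g, ∃ k' ∈ L', key y = k' := by
      intro y hy
      obtain ⟨k', hk', hyk⟩ := List.mem_flatMap.mp hy
      exact ⟨k', hk', hblocks k' (by simp [hk']) y hyk⟩
    have hlt : ∀ k' ∈ L', kk < k' := by
      intro k' hk'
      exact (List.pairwise_cons.mp hL).1 k' hk'
    rw [List.flatMap_cons, List.flatMap_cons]
    by_cases hkx : kk = key x
    · have hpre : ∀ b ∈ g kk, (fun a b => decide (key a < key b)) x b = false := by
        intro b hb
        have : key b = kk := hblocks kk (by simp) b hb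
        simp [this, hkx]
      rw [insertBy_through_prefix _ _ _ _ hpre]
      have hins : PySem.List.insertBy (fun a b => decide (key a < key b)) x (L'.flatMap g) =
          x :: L'.flatMap g := by
        cases hfl : L'.flatMap g with
        | nil => rfl
        | cons y ys =>
          have hy : y ∈ L'.flatMap g := by rw [hfl]; simp
          obtain ⟨k', hk', hyk⟩ := hkey_flat y hy
          have : key x < key y := by rw [hyk, ← hkx]; exact hlt k' hk'
          simp [PySem.List.insertBy, this]
      rw [hins, if_pos hkx]
      have hblocks' : L'.flatMap (fun k => if k = key x then g k ++ [x] else g k) =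
          L'.flatMap g := by
        apply List.flatMap_congr
        intro k' hk'
        rw [if_neg (by have := hlt k' hk'; omega)]
      rw [hblocks']
      simp
    · have hmem' : key x ∈ L' := by
        rcases (List.mem_cons.mp hmem) with h | h
        · exact absurd h.symm hkx
        · exact h
      have hpre : ∀ b ∈ g kk, (fun a b => decide (key a < key b)) x b = false := by
        intro b hb
        have hbk : key b = kk := hblocks kk (by simp) b hb
        have : kk < key x := hlt _ hmem'
        simp [hbk]
        omega
      rw [insertBy_through_prefix _ _ _ _ hpre]
      rw [ih (List.Pairwise.of_cons hL) hmem'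
          (fun k hk y hy => hblocks k (by simp [hk]) y hy)]
      rw [if_neg hkx]

-- Python's stable sort by key, described as blocks in increasing key order
theorem sorted_eq_flatMap {α : Type} (key : α → Int) (xs : List α) (L : List Int)
    (hL : L.Pairwise (· < ·)) (hcov : ∀ x ∈ xs, key x ∈ L) :
    PySem.List.sorted xs key = L.flatMap (fun k => xs.filter (fun x => key x == k)) := by
  induction xs using List.reverseRecOn with
  | nil => simp [show PySem.List.sorted ([] : List α) key = [] from rfl]
  | append_singleton ys x ihy =>
    have hsortapp : PySem.List.sorted (ys ++ [x]) key =
        PySem.List.insertBy (fun a b => decide (key a < key b)) x (PySem.List.sorted ys key) := by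
      rw [PySem.List.sorted_eq_foldl_insertBy, PySem.List.sorted_eq_foldl_insertBy,
          List.foldl_append]
      rfl
    rw [hsortapp, ihy (fun y hy => hcov y (by simp [hy]))]
    rw [insertBy_flatMap key x L (fun k => ys.filter (fun y => key y == k)) hL
        (hcov x (by simp))
        (fun k _ y hy => by
          have := List.of_mem_filter hy
          simpa using this)]
    apply List.flatMap_congr
    intro k hk
    rw [List.filter_append]
    by_cases hkx : k = key x
    · rw [if_pos hkx]
      simp [hkx]
    · rw [if_neg hkx]
      have hb : (key x == k) = false := by
        rw [beq_eq_false_iff_ne]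
        exact fun h => hkx h.symm
      simp [hb]

theorem foldl_flatMap {α β σ : Type} (l : List α) (g : α → List β) (f : σ → β → σ) (init : σ) :
    (l.flatMap g).foldl f init = l.foldl (fun st x => (g x).foldl f st) init := by
  induction l generalizing init with
  | nil => rfl
  | cons x t ih => simp [List.foldl_append, ih]

theorem foldRep_none (l : List (Int × List Char)) : l.foldl pvB_repStep none = none := by
  induction l with
  | nil => rfl
  | cons x t ih => simpa [pvB_repStep] using ih

theorem foldl_stay_none {α σ : Type} (f : Option σ → α → Option σ)
    (hf : ∀ x, f none x = none) (l : List α) : l.foldl f none = none := by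
  induction l with
  | nil => rfl
  | cons x t ih => rw [List.foldl_cons, hf]; exact ih

-- one block: running B's step with a larger seen-set whose extra elements have other lengths
theorem block_fold (leng : Int) (gl : List (Int × List Char))
    (hgl : ∀ g ∈ gl, g.1 = leng ∧ pvGood g) :
    ∀ (r : List Char) (d : PySem.Dict Int (List String)) (i : Int)
      (S SA : PySem.Set (List Char)),
      (∀ s ∈ S, (s.length : Int) ≠ leng - 1) → (∀ s ∈ SA, (s.length : Int) = leng - 1) →
      (gl.foldl pvB_repStep (some (r, d, i, S ++ SA)) = none ∧
        gl.foldl pvB_repStep (some (r, d, i, SA)) = none) ∨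
      (∃ r' d' i' SA', gl.foldl pvB_repStep (some (r, d, i, SA)) = some (r', d', i', SA') ∧
        gl.foldl pvB_repStep (some (r, d, i, S ++ SA)) = some (r', d', i', S ++ SA') ∧
        (∀ s ∈ SA', (s.length : Int) = leng - 1)) := by
  induction gl with
  | nil =>
    intro r d i S SA hS hSA
    exact Or.inr ⟨r, d, i, SA, rfl, rfl, hSA⟩
  | cons g gl' ih =>
    intro r d i S SA hS hSA
    obtain ⟨hg1, mid, hsub, hfree, hlen⟩ :
        g.1 = leng ∧ ∃ mid, g.2 = '(' :: (mid ++ [')']) ∧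
          (∀ c ∈ mid, c ≠ '(' ∧ c ≠ ')') ∧ g.1 = (mid.length : Int) + 1 := by
      obtain ⟨h1, mid, h2, h3, h4⟩ := hgl g (by simp)
      exact ⟨h1, mid, h2, h3, h4⟩
    have hname : PySem.Chars.slice g.2 (some 1) (some (-1)) = mid := by
      rw [hsub]; exact slice_inner '(' ')' mid
    have hmlen : (mid.length : Int) = leng - 1 := by omega
    have hgl' : ∀ g ∈ gl', g.1 = leng ∧ pvGood g := fun g hg => hgl g (by simp [hg])
    have hSmem : mid ∉ S := by
      intro hmem
      exact hS mid hmem hmlen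
    simp only [List.foldl_cons, pvB_repStep, hname]
    by_cases hmem : mid ∈ SA
    · have hmem2 : mid ∈ S ++ SA := List.mem_append.mpr (Or.inr hmem)
      simp only [hmem, hmem2, PySem.Set.contains, List.contains_eq_mem, decide_true, if_pos]
      exact ih hgl' r d i S SA hS hSA
    · have hmem2 : mid ∉ S ++ SA := by
        intro h
        rcases List.mem_append.mp h with h | h
        · exact hSmem h
        · exact hmem h
      simp only [PySem.Set.contains, List.contains_eq_mem, hmem, hmem2, decide_false,
        Bool.false_eq_true, if_false]
      cases hget : d.get? i with
      | none =>
        simp only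
        rw [foldRep_none]
        exact Or.inl ⟨rfl, rfl⟩
      | some lst =>
        simp only
        have hadd1 : PySem.Set.add SA mid = SA ++ [mid] := by
          simp [PySem.Set.add, PySem.Set.contains, List.contains_eq_mem, hmem]
        have hadd2 : PySem.Set.add (S ++ SA) mid = S ++ (SA ++ [mid]) := by
          simp [PySem.Set.add, PySem.Set.contains, List.contains_eq_mem, hmem2]
        rw [hadd1, hadd2]
        apply ih hgl'
        · exact hS
        · intro s hs
          rcases List.mem_append.mp hs with hs | hs
          · exact hSA s hs
          · simp at hs
            subst hs
            exact hmlen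

-- the whole replacement phase: A's per-length rescan equals B's single sorted pass
theorem phase2 (cs : List Char) (pairs : List (Int × Int)) (groups : List (Int × List Char))
    (hg : groups = (pairs.filter (pvInnerTest cs)).map (pvToGroup cs))
    (hgood : ∀ g ∈ groups, pvGood g)
    (d : PySem.Dict Int (List String)) (r : List Char) (i0 : Int) :
    (PySem.List.sorted
        (PySem.Set.ofList (PySem.List.sorted (pairs.map (fun p => p.2 - p.1)) (fun x => x)))
        (fun x => x)).foldl (fun st leng =>
        match (pairs.foldl (fun st2 p =>
            if p.2 - p.1 == leng then
              (if PySem.Chars.count (PySem.Chars.slice cs (some p.1) (some (p.2 + 1))) ['('] == 1 then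
                 pvA_hit cs p st2
               else st2)
            else st2)
          (match st with
           | none => none
           | some (r, d, i) => some (r, d, i, PySem.Set.empty))) with
        | none => none
        | some (r, d, i, _) => some (r, d, i))
      (some (r, d, i0)) =
    Option.map (fun s => (s.1, s.2.1, s.2.2.1))
      ((PySem.List.sorted groups (fun g => g.1)).foldl pvB_repStep
        (some (r, d, i0, PySem.Set.empty))) := by
  have hLpw : (PySem.List.sorted
      (PySem.Set.ofList (PySem.List.sorted (pairs.map (fun p => p.2 - p.1)) (fun x => x)))
      (fun x => x)).Pairwise (· < ·) := PySem.List.sorted_ofList_pairwise_lt _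
  have hcov : ∀ g ∈ groups, g.1 ∈ PySem.List.sorted
      (PySem.Set.ofList (PySem.List.sorted (pairs.map (fun p => p.2 - p.1)) (fun x => x)))
      (fun x => x) := by
    intro g hgm
    rw [hg] at hgm
    obtain ⟨p, hp, rfl⟩ := List.mem_map.mp hgm
    have hp' : p ∈ pairs := List.mem_of_mem_filter hp
    rw [PySem.List.mem_sorted, PySem.Set.mem_ofList, PySem.List.mem_sorted]
    exact List.mem_map.mpr ⟨p, hp', rfl⟩
  have hbodyA_none : ∀ (leng : Int) (p : Int × Int),
      (fun st2 p =>
            if p.2 - p.1 == leng then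
              (if PySem.Chars.count (PySem.Chars.slice cs (some p.1) (some (p.2 + 1))) ['('] == 1 then
                 pvA_hit cs p st2
               else st2)
            else st2) none p = none := by
    intro leng p
    simp only [pvA_hit]
    split
    · split <;> rfl
    · rfl
  have hinner : ∀ (leng : Int) (r' : List Char) (d' : PySem.Dict Int (List String)) (i' : Int),
      (pairs.foldl (fun st2 p =>
            if p.2 - p.1 == leng then
              (if PySem.Chars.count (PySem.Chars.slice cs (some p.1) (some (p.2 + 1))) ['('] == 1 then
                 pvA_hit cs p st2
               else st2)
            else st2) (some (r', d', i', PySem.Set.empty)))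
        = (groups.filter (fun g => g.1 == leng)).foldl pvB_repStep
            (some (r', d', i', PySem.Set.empty)) := by
    intro leng r' d' i'
    rw [PySem.List.foldl_if_eq_foldl_filter (fun p : Int × Int => p.2 - p.1 == leng)
        (fun st2 p =>
          if PySem.Chars.count (PySem.Chars.slice cs (some p.1) (some (p.2 + 1))) ['('] == 1 then
            pvA_hit cs p st2
          else st2) pairs (some (r', d', i', PySem.Set.empty))]
    rw [PySem.List.foldl_if_eq_foldl_filter
        (fun p : Int × Int =>
          PySem.Chars.count (PySem.Chars.slice cs (some p.1) (some (p.2 + 1))) ['('] == 1)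
        (fun st2 p => pvA_hit cs p st2) _ (some (r', d', i', PySem.Set.empty))]
    rw [hg, List.filter_map, List.foldl_map]
    rw [show ((fun g : Int × List Char => g.1 == leng) ∘ (pvToGroup cs)) =
        (fun p : Int × Int => p.2 - p.1 == leng) from rfl]
    rw [List.filter_comm]
    apply PySem.List.foldl_congr_mem
    intro acc x hx
    have hx1 : x ∈ pairs.filter (pvInnerTest cs) := List.mem_of_mem_filter hx
    have hgm : pvToGroup cs x ∈ groups := by
      rw [hg]
      exact List.mem_map.mpr ⟨x, hx1, rfl⟩
    exact hit_eq_repStep cs x (hgood _ hgm) acc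
  have houter : ∀ (L' : List Int), L'.Pairwise (· < ·) →
      ∀ (r' : List Char) (d' : PySem.Dict Int (List String)) (i' : Int)
        (S : PySem.Set (List Char)),
      (∀ s ∈ S, ∀ leng ∈ L', (s.length : Int) ≠ leng - 1) →
      L'.foldl (fun st leng =>
        match (pairs.foldl (fun st2 p =>
            if p.2 - p.1 == leng then
              (if PySem.Chars.count (PySem.Chars.slice cs (some p.1) (some (p.2 + 1))) ['('] == 1 then
                 pvA_hit cs p st2
               else st2)
            else st2)
          (match st with
           | none => none
           | some (r, d, i) => some (r, d, i, PySem.Set.empty))) with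
        | none => none
        | some (r, d, i, _) => some (r, d, i))
        (some (r', d', i')) =
      Option.map (fun s => (s.1, s.2.1, s.2.2.1))
        (L'.foldl (fun st leng =>
            (groups.filter (fun g => g.1 == leng)).foldl pvB_repStep st)
          (some (r', d', i', S))) := by
    intro L'
    induction L' with
    | nil =>
      intro _ r' d' i' S _
      rfl
    | cons leng L'' ihL =>
      intro hpw r' d' i' S hSinv
      simp only [List.foldl_cons]
      rw [hinner leng r' d' i']
      have hbp : ∀ g ∈ groups.filter (fun g => g.1 == leng), g.1 = leng ∧ pvGood g := by
        intro g hgm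
        have h1 := List.of_mem_filter hgm
        have h2 := List.mem_of_mem_filter hgm
        exact ⟨by simpa using h1, hgood g h2⟩
      have hemp : (PySem.Set.empty : PySem.Set (List Char)) = [] := rfl
      rw [hemp]
      have hblock := block_fold leng _ hbp r' d' i' S []
        (fun s hs => hSinv s hs leng (by simp)) (by simp)
      rw [List.append_nil] at hblock
      rcases hblock with ⟨hbn1, hbn2⟩ | ⟨r2, d2, i2, SA', hb1, hb2, hSA'⟩
      · rw [hbn1, hbn2]
        have hA : L''.foldl (fun st leng =>
            match (pairs.foldl (fun st2 p =>
                if p.2 - p.1 == leng then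
                  (if PySem.Chars.count (PySem.Chars.slice cs (some p.1) (some (p.2 + 1))) ['('] == 1 then
                     pvA_hit cs p st2
                   else st2)
                else st2)
              (match st with
               | none => none
               | some (r, d, i) => some (r, d, i, PySem.Set.empty))) with
            | none => none
            | some (r, d, i, _) => some (r, d, i)) none = none := by
          apply foldl_stay_none
          intro leng'
          show (match (pairs.foldl (fun st2 p =>
                if p.2 - p.1 == leng' then
                  (if PySem.Chars.count (PySem.Chars.slice cs (some p.1) (some (p.2 + 1))) ['('] == 1 then
                     pvA_hit cs p st2
                   else st2)
                else st2) none) with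
            | none => none
            | some (r, d, i, _) => some (r, d, i)) = none
          rw [foldl_stay_none _ (hbodyA_none leng') pairs]
        have hB : L''.foldl (fun st leng =>
            (groups.filter (fun g => g.1 == leng)).foldl pvB_repStep st) none = none := by
          apply foldl_stay_none
          intro leng'
          exact foldRep_none _
        show L''.foldl (fun st leng =>
            match (pairs.foldl (fun st2 p =>
                if p.2 - p.1 == leng then
                  (if PySem.Chars.count (PySem.Chars.slice cs (some p.1) (some (p.2 + 1))) ['('] == 1 then
                     pvA_hit cs p st2
                   else st2)
                else st2)
              (match st with
               | none => none
               | some (r, d, i) => some (r, d, i, PySem.Set.empty))) with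
            | none => none
            | some (r, d, i, _) => some (r, d, i)) none =
          Option.map (fun s => (s.1, s.2.1, s.2.2.1))
            (L''.foldl (fun st leng =>
              (groups.filter (fun g => g.1 == leng)).foldl pvB_repStep st) none)
        rw [hA, hB]
        rfl
      · rw [hb1, hb2]
        apply ihL (List.Pairwise.of_cons hpw)
        intro s hs leng' hl'
        rcases List.mem_append.mp hs with hs | hs
        · exact hSinv s hs leng' (by simp [hl'])
        · have hlt : leng < leng' := (List.pairwise_cons.mp hpw).1 leng' hl'
          rw [hSA' s hs]
          omega
  rw [sorted_eq_flatMap (fun g => g.1) groups _ hLpw hcov, foldl_flatMap]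
  exact houter _ hLpw r d i0 PySem.Set.empty (by intro s hs; simp [PySem.Set.empty] at hs)

theorem prepare_tree_main (tree_str : String) (close_node_dict : List (Int × List String)) :
    prepare_tree tree_str close_node_dict = prepare_tree_alt tree_str close_node_dict := by
  simp only [prepare_tree, prepare_tree_alt]
  have hlen : PySem.Str.len tree_str = ((tree_str.toList).length : Int) := by
    simp [pysem]
  have hscan := scan_loop tree_str.toList tree_str.toList 0 (by simp)
    [] [] [] false
    (by
      refine ⟨by simp, by simp, ?_, ?_, by simp, by simp⟩
      · intro h; simp at h
      · intro _ na hna; simp at hna)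
  rw [hlen]
  rcases hscan with ⟨ha, hb⟩ | ⟨stack, pairs, groups, prev, ha, hb, hgr, hgood⟩
  · simp only [Int.natCast_zero] at ha hb
    rw [ha, hb]
  · simp only [Int.natCast_zero] at ha hb
    rw [ha, hb]
    simp only
    rw [phase2 tree_str.toList pairs groups hgr hgood]
    cases hres : (PySem.List.sorted groups (fun g => g.1)).foldl pvB_repStep
        (some (tree_str.toList, PySem.Dict.ofList close_node_dict,
               (close_node_dict.length : Int) + 1, PySem.Set.empty)) with
    | none => simp
    | some s => simp

-- ===== VERDICT (by name: the statement is the Claim_ definition above) =====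
theorem prepare_tree_spec : Claim_equal_prepare_tree := by
  intro tree_str close_node_dict _ _
  unfold Spec_prepare_tree
  exact prepare_tree_main tree_str close_node_dict
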